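-- pv_equiv track=rewrite | github.com/hkhurram122/CSC180 | lab03.py | check_sums_up_to_n
-- ===== SOURCE A (Python) =====
-- def sum_cubes(n):
--     temp = 0
--     for i in range(1, n + 1):
--         temp += i**3
--     return temp
--
-- def sum_formula(n):
--     temp_1 = 0
--     for j in range(1, n + 1):
--         temp_1 += j
--     temp_2 = temp_1 ** 2
--     return temp_2
--
-- def check_sum(n):
--     if (sum_cubes(n) == sum_formula(n)):
--         return True
--     else:
--         return False
--
-- def check_sums_up_to_n(N):
--     count = 0
--     for k in range(1, N+1):
--         if check_sum(k) == True:
--             count += 1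
--     if (count == N):
--         return True
--     else:
--         return False
--
-- n = 10000
-- ===== SOURCE B (Python) =====
-- def check_sums_up_to_n(N):
--     # The Nicomachus identity sum_{i<=k} i^3 == (sum_{i<=k} i)^2 holds for every k,
--     # so the loop's count always equals max(N, 0); count == N reduces to N >= 0.
--     return N >= 0
-- ===== Notes on version B (the rewrite author's own statement) =====
-- stated objective: faster
-- what changed: Replaced the O(N^2) loop that re-verifies the Nicomachus identity for every k with the closed-form observation that the identity always holds, so the count equals max(N,0) and the whole check reduces to N >= 0.
import Mathlib
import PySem

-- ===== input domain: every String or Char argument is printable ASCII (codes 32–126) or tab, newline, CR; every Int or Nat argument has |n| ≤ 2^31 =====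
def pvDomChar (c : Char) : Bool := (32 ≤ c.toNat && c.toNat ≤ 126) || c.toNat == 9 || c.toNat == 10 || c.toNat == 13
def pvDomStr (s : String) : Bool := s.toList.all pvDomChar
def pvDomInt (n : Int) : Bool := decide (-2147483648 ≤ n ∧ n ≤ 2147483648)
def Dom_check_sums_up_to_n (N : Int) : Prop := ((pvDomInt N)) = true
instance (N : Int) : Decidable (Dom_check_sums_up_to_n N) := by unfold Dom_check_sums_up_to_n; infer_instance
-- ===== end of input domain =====

-- B replaces A's O(N^2) verification loop with the closed form N >= 0 (the checked identity always holds).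

-- ===== PORT A =====
def sum_cubes (n : Int) : Int :=
  (PySem.List.pyRange 1 (n + 1)).foldl (fun temp i => temp + i ^ 3) 0

def sum_formula (n : Int) : Int :=
  let temp_1 := (PySem.List.pyRange 1 (n + 1)).foldl (fun t j => t + j) 0
  let temp_2 := temp_1 ^ 2
  temp_2

def check_sum (n : Int) : Bool :=
  if sum_cubes n == sum_formula n then true else false

def check_sums_up_to_n (N : Int) : Bool :=
  let count := (PySem.List.pyRange 1 (N + 1)).foldl
    (fun count k => if check_sum k == true then count + 1 else count) 0
  if count == N then true else false

-- ===== PORT B =====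
def check_sums_up_to_n_alt (N : Int) : Bool :=
  decide (0 ≤ N)

-- ===== PRECONDITION & SPEC =====
def Spec_check_sums_up_to_n (N : Int) (out : Bool) : Prop := out = check_sums_up_to_n_alt N
instance (N : Int) (out : Bool) : Decidable (Spec_check_sums_up_to_n N out) := by unfold Spec_check_sums_up_to_n; infer_instance

-- ===== CLAIM (what is proved, stated in full; the proofs are below) =====
def Claim_equal_check_sums_up_to_n : Prop := ∀ (N : Int), Dom_check_sums_up_to_n N → Spec_check_sums_up_to_n N (check_sums_up_to_n N)

-- ===== LEMMAS AND PROOFS =====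

-- Invariant for the two inner loops, stated for nonnegative upper bound m:
-- twice the running sum is m(m+1), and the cube sum is the square of the sum.
theorem pv_sums_invariant (m : Nat) :
    2 * (PySem.List.pyRange 1 ((m : Int) + 1)).foldl (fun t j => t + j) 0
        = (m : Int) * ((m : Int) + 1) ∧
    (PySem.List.pyRange 1 ((m : Int) + 1)).foldl (fun temp i => temp + i ^ 3) 0
        = ((PySem.List.pyRange 1 ((m : Int) + 1)).foldl (fun t j => t + j) 0) ^ 2 := by
  induction m with
  | zero => simp [PySem.List.pyRange_one_eq_nil (by norm_num : (1:Int) ≤ 1)]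
  | succ m ih =>
    obtain ⟨hs, hc⟩ := ih
    have hrange : PySem.List.pyRange 1 ((↑(m + 1) : Int) + 1)
        = PySem.List.pyRange 1 ((m : Int) + 1) ++ [(m : Int) + 1] := by
      push_cast
      exact PySem.List.pyRange_one_succ_right (by omega)
    rw [hrange]
    simp only [List.foldl_append, List.foldl_cons, List.foldl_nil]
    constructor
    · push_cast; linarith
    · nlinarith [hs, hc]

-- check_sum returns True on every input (the Nicomachus identity; empty range for n ≤ 0).
theorem pv_check_sum_true (n : Int) : check_sum n = true := by
  unfold check_sum sum_cubes sum_formula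
  rcases le_or_gt n 0 with h | h
  · rw [PySem.List.pyRange_one_eq_nil (by omega)]
    simp
  · obtain ⟨m, hm⟩ : ∃ m : Nat, n = (m : Int) := ⟨n.toNat, by omega⟩
    subst hm
    simp only [beq_iff_eq]
    simp [(pv_sums_invariant m).2]

-- Since check_sum is always true, A's counting fold just adds the list length.
theorem pv_count_fold (l : List Int) (c : Int) :
    l.foldl (fun count k => if check_sum k == true then count + 1 else count) c
      = c + l.length := by
  induction l generalizing c with
  | nil => simp
  | cons x xs ih =>
    simp only [List.foldl_cons, pv_check_sum_true x, beq_self_eq_true, if_pos, List.length_cons]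
    rw [ih]; push_cast; ring

-- ===== VERDICT (by name: the statement is the Claim_ definition above) =====
theorem check_sums_up_to_n_spec : Claim_equal_check_sums_up_to_n := by
  intro N _
  show check_sums_up_to_n N = check_sums_up_to_n_alt N
  unfold check_sums_up_to_n check_sums_up_to_n_alt
  rw [pv_count_fold, PySem.List.length_pyRange_one]
  rcases le_or_gt 0 N with h | h
  · simp only [beq_iff_eq]
    rw [if_pos (by omega), decide_eq_true h]
  · simp only [beq_iff_eq]
    rw [if_neg (by omega), eq_comm, decide_eq_false_iff_not]
    omega
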